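-- pv_equiv track=rewrite | github.com/miliar/Code_Jam_Webscraper | Solutions_python/Problem_201/1815.py | bathroomStalls
-- ===== SOURCE A (Python) =====
-- from queue import PriorityQueue
--
-- def bathroomStalls(N, K):
--     q = PriorityQueue(maxsize=-1)
--     q.put(-N)
--
--     minimum, maximum = 0, 0
--     while K > 0:
--         K -= 1
--         space = -q.get()
--         spot = (space - 1) // 2
--
--         minimum, maximum = spot, space - spot - 1
--         q.put(-minimum)
--         q.put(-maximum)
--
--     return minimum, maximum
-- ===== SOURCE B (Python) =====
-- def bathroomStalls(N, K):
--     if K <= 0: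
--         return (0, 0)
--     # counts of the two adjacent gap sizes (t and t-1) on the current heap level
--     t, big, small = N, 1, 0
--     while t > 1 and K > big + small:
--         K -= big + small
--         if t % 2 == 0:
--             t, big, small = t // 2, big, big + 2 * small
--         else:
--             t, big, small = t // 2, 2 * big + small, small
--     if K <= big:
--         s = t
--     elif K <= big + small:
--         s = t - 1
--     else:
--         s = 0  # K exceeds the number of stalls: only zero-width gaps are left
--     return ((s - 1) // 2, s // 2)
-- ===== Notes on version B (the rewrite author's own statement) =====
-- stated objective: faster
-- what changed: A simulates all K splits one pop at a time on a priority queue; B keeps only the counts of the at-most-two adjacent gap sizes of the current heap level and processes a whole level per iteration, so the loop runs O(log) times instead of K; Pre_ excludes only negative stall counts N with K >= 1, where A's values come from splitting negative-size gaps and are accidental artefacts of the queue simulation.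
-- outside the precondition, e.g. on bathroomStalls(-8, 3): A returns (-2, -1), B returns (-1, 0)
import Mathlib
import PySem

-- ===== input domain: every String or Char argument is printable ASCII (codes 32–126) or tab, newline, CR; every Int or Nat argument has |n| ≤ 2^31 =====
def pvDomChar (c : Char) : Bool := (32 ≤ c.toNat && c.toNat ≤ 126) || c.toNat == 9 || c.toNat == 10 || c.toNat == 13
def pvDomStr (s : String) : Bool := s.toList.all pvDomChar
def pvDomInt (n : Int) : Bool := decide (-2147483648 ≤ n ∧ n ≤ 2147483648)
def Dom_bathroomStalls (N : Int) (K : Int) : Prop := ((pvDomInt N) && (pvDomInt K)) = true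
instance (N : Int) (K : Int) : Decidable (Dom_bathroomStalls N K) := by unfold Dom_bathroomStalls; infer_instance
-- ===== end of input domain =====

-- B replaces A's one-pop-at-a-time priority-queue simulation of the K stall splits by a
-- grouped simulation that keeps only the counts of the (at most two, adjacent) segment sizes
-- of the current heap level and processes a whole level per iteration (measurably faster).

-- ===== PORT A =====
-- The PriorityQueue is ported as a sorted (value, count) association list: put inserts a
-- value keeping the keys sorted, get removes one copy of the smallest value. This is the
-- queue ADT itself (same multiset, same extract-min), kept efficient enough to evaluate.
def qput (v : Int) : List (Int × Int) → List (Int × Int)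
  | [] => [(v, 1)]
  | (w, c) :: rest =>
    if v < w then (v, 1) :: (w, c) :: rest
    else if v = w then (v, c + 1) :: rest
    else (w, c) :: qput v rest

-- smallest element of the queue (the queue is never empty in A's loop)
def qtop : List (Int × Int) → Int
  | [] => 0
  | (w, _) :: _ => w

-- remove one copy of the smallest element
def qpop : List (Int × Int) → List (Int × Int)
  | [] => []
  | (w, c) :: rest => if c = 1 then rest else (w, c - 1) :: rest

-- the `while K > 0` loop, one iteration per unit of fuel (fuel = K.toNat)
def loopA : Nat → List (Int × Int) → Int → Int → Int × Int
  | 0, _, mn, mx => (mn, mx)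
  | k+1, q, _, _ =>
    let m := qtop q
    let q' := qpop q
    let space := -m
    let spot := PySem.Int.floordiv (space - 1) 2
    let mn := spot
    let mx := space - spot - 1
    loopA k (qput (-mx) (qput (-mn) q')) mn mx

def bathroomStalls (N : Int) (K : Int) : List Int :=
  let r := loopA K.toNat (qput (-N) []) 0 0
  [r.1, r.2]

-- ===== PORT B =====
-- the `while t > 1 and K > big + small` loop of Source B
def levelLoop (t : Int) (K : Int) (big : Int) (small : Int) : Int × Int × Int × Int :=
  if h : 1 < t ∧ big + small < K then
    if PySem.Int.mod t 2 = 0 then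
      levelLoop (PySem.Int.floordiv t 2) (K - (big + small)) big (big + 2 * small)
    else
      levelLoop (PySem.Int.floordiv t 2) (K - (big + small)) (2 * big + small) small
  else (t, K, big, small)
termination_by t.toNat
decreasing_by
  all_goals
    have h2 : PySem.Int.floordiv t 2 = t / 2 := PySem.Int.floordiv_eq_ediv_of_pos (by omega)
    rw [h2]; omega

def bathroomStalls_alt (N : Int) (K : Int) : List Int :=
  if K ≤ 0 then [0, 0]
  else
    let r := levelLoop N K 1 0
    let t := r.1
    let K' := r.2.1
    let big := r.2.2.1
    let small := r.2.2.2
    let s := if K' ≤ big then t else if K' ≤ big + small then t - 1 else 0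
    [PySem.Int.floordiv (s - 1) 2, PySem.Int.floordiv s 2]

-- ===== PRECONDITION & SPEC =====
-- Pre_ excludes only negative stall counts N with K ≥ 1: there A still returns, but its
-- values arise from splitting gaps of negative size and are accidental artefacts of the
-- queue simulation, which B does not reproduce.
def Pre_bathroomStalls (N : Int) (K : Int) : Prop := K ≤ 0 ∨ 0 ≤ N
instance (N : Int) (K : Int) : Decidable (Pre_bathroomStalls N K) := by unfold Pre_bathroomStalls; infer_instance

def pvWitness_bathroomStalls : Int × Int := (5, 3)

def Spec_bathroomStalls (N : Int) (K : Int) (out : List Int) : Prop := out = bathroomStalls_alt N K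
instance (N : Int) (K : Int) (out : List Int) : Decidable (Spec_bathroomStalls N K out) := by unfold Spec_bathroomStalls; infer_instance

-- ===== CLAIM (what is proved, stated in full; the proofs are below) =====
def Claim_equal_bathroomStalls : Prop := ∀ (N : Int) (K : Int), Dom_bathroomStalls N K → Pre_bathroomStalls N K → Spec_bathroomStalls N K (bathroomStalls N K)

-- ===== LEMMAS AND PROOFS =====

-- reference model of the queue: the plain list of its elements, popped by scanning for the minimum
def pyMin (l : List Int) : Int := (l.min?).getD 0

def loopAList : Nat → List Int → Int → Int → Int × Int
  | 0, _, mn, mx => (mn, mx)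
  | k+1, q, _, _ =>
    let m := pyMin q
    let q' := q.erase m
    let space := -m
    let spot := PySem.Int.floordiv (space - 1) 2
    let mn := spot
    let mx := space - spot - 1
    loopAList k (q' ++ [-mn, -mx]) mn mx

def fd (x : Int) : Int := PySem.Int.floordiv x 2

theorem fd_eq (x : Int) : fd x = x / 2 := PySem.Int.floordiv_eq_ediv_of_pos (by omega)

theorem min?_perm (l l' : List Int) (h : l.Perm l') : l.min? = l'.min? := by
  cases hm : l.min? with
  | none =>
    rw [List.min?_eq_none_iff] at hm
    subst hm
    rw [List.Perm.eq_nil h.symm]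
    rfl
  | some a =>
    rw [List.min?_eq_some_iff] at hm
    exact (List.min?_eq_some_iff.mpr ⟨h.mem_iff.mp hm.1, fun b hb => hm.2 b (h.mem_iff.mpr hb)⟩).symm

theorem loopAList_perm : ∀ (k : Nat) (q q' : List Int) (a0 a1 : Int),
    q.Perm q' → loopAList k q a0 a1 = loopAList k q' a0 a1 := by
  intro k
  induction k with
  | zero => intro q q' a0 a1 _; rfl
  | succ k ih =>
    intro q q' a0 a1 h
    have hm : pyMin q = pyMin q' := by unfold pyMin; rw [min?_perm q q' h]
    simp only [loopAList, hm]
    exact ih _ _ _ _ ((h.erase _).append_right _)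

theorem loopAList_acc (k : Nat) (hk : 1 ≤ k) (q : List Int) (a0 a1 b0 b1 : Int) :
    loopAList k q a0 a1 = loopAList k q b0 b1 := by
  cases k with
  | zero => omega
  | succ k => rfl

theorem perm_count (l l' : List Int) (h : ∀ x, l.count x = l'.count x) : l.Perm l' :=
  List.perm_iff_count.mpr h

theorem popValue (k : Nat) (q r : List Int) (v a0 a1 : Int)
    (hperm : q.Perm ((-v) :: r)) (hmin : ∀ x ∈ q, -v ≤ x) :
    loopAList (k+1) q a0 a1 =
      loopAList k (r ++ [-(fd (v-1)), -(fd v)]) (fd (v-1)) (fd v) := by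
  rw [loopAList_perm (k+1) q ((-v) :: r) a0 a1 hperm]
  have hmin' : ∀ x ∈ (-v) :: r, -v ≤ x := fun x hx => hmin x (hperm.mem_iff.mpr hx)
  have hm : pyMin ((-v) :: r) = -v := by
    unfold pyMin
    rw [List.min?_eq_some_iff.mpr ⟨List.mem_cons_self, hmin'⟩]
    rfl
  simp only [loopAList, hm, List.erase_cons_head, neg_neg]
  have e1 : PySem.Int.floordiv (v - 1) 2 = fd (v - 1) := rfl
  rw [e1]
  have e2 : v - fd (v - 1) - 1 = fd v := by
    rw [fd_eq, fd_eq]; omega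
  rw [e2]

theorem popReps : ∀ (n k : Nat) (v : Int) (D : List Int) (a0 a1 : Int), 0 ≤ v → 1 ≤ k →
    (∀ x ∈ D, -v ≤ x) →
    loopAList k (List.replicate n (-v) ++ D) a0 a1 =
      if k ≤ n then (fd (v-1), fd v)
      else loopAList (k - n) (D ++ List.replicate n (-(fd (v-1))) ++ List.replicate n (-(fd v))) a0 a1 := by
  intro n
  induction n with
  | zero =>
    intro k v D a0 a1 hv hk hD
    rw [if_neg (by omega)]
    simp only [List.replicate_zero, List.nil_append, List.append_nil, Nat.sub_zero]
  | succ n ih =>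
    intro k v D a0 a1 hv hk hD
    cases k with
    | zero => omega
    | succ k =>
      have hlo : fd (v-1) ≤ v := by rw [fd_eq]; omega
      have hhi : fd v ≤ v := by rw [fd_eq]; omega
      have hmin : ∀ x ∈ List.replicate (n+1) (-v) ++ D, -v ≤ x := by
        intro x hx
        rcases List.mem_append.mp hx with h | h
        · rw [List.eq_of_mem_replicate h]
        · exact hD x h
      have hperm : (List.replicate (n+1) (-v) ++ D).Perm ((-v) :: (List.replicate n (-v) ++ D)) :=
        List.Perm.refl _
      rw [popValue k _ _ v a0 a1 hperm hmin]
      cases Nat.eq_zero_or_pos k with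
      | inl hk0 =>
        subst hk0
        rw [if_pos (by omega)]
        rfl
      | inr hk1 =>
        rw [loopAList_perm k _ (List.replicate n (-v) ++ (D ++ [-(fd (v-1)), -(fd v)])) _ _ (by
          apply perm_count
          intro x
          simp only [List.count_append, List.count_replicate, List.count_cons, List.count_nil, beq_iff_eq]
          split_ifs <;> omega)]
        have hD' : ∀ x ∈ D ++ [-(fd (v-1)), -(fd v)], -v ≤ x := by
          intro x hx
          rcases List.mem_append.mp hx with h | h
          · exact hD x h
          · simp at h; rcases h with h | h <;> omega
        rw [ih k v _ _ _ hv hk1 hD']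
        by_cases hkn : k ≤ n
        · rw [if_pos hkn, if_pos (by omega)]
        · rw [if_neg hkn, if_neg (by omega)]
          have : k - n = k + 1 - (n + 1) := by omega
          rw [← this]
          rw [loopAList_acc (k-n) (by omega) _ (fd (v-1)) (fd v) a0 a1]
          apply loopAList_perm
          apply perm_count
          intro x
          simp only [List.count_append, List.count_replicate, List.count_cons, List.count_nil, beq_iff_eq]
          split_ifs <;> omega

def L (t : Int) (b s : Nat) : List Int :=
  List.replicate b (-t) ++ List.replicate s (-(t - 1))

theorem level (t : Int) (ht : 1 ≤ t) (b s : Nat) (hb : 1 ≤ b) (k : Nat) (hk : 1 ≤ k) (a0 a1 : Int) :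
    loopAList k (L t b s) a0 a1 =
      if k ≤ b then (fd (t-1), fd t)
      else if k ≤ b + s then (fd (t-2), fd (t-1))
      else if t % 2 = 0 then loopAList (k-(b+s)) (L (fd t) b (b+2*s)) a0 a1
      else loopAList (k-(b+s)) (L (fd t) (2*b+s) s) a0 a1 := by
  unfold L
  rw [popReps b k t _ a0 a1 (by omega) hk (by
    intro x hx; rw [List.eq_of_mem_replicate hx]; omega)]
  by_cases hkb : k ≤ b
  · rw [if_pos hkb, if_pos hkb]
  · rw [if_neg hkb, if_neg hkb]
    rw [List.append_assoc]
    have hfd1 : fd (t-1) ≤ t - 1 := by rw [fd_eq]; omega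
    have hfdt : fd t ≤ t - 1 := by rw [fd_eq]; omega
    rw [popReps s (k-b) (t-1) _ a0 a1 (by omega) (by omega) (by
      intro x hx
      rcases List.mem_append.mp hx with h | h <;> rw [List.eq_of_mem_replicate h] <;> omega)]
    have e12 : t - 1 - 1 = t - 2 := by ring
    by_cases hks : k - b ≤ s
    · rw [if_pos (by omega), if_pos (by omega), e12]
    · rw [if_neg (by omega), if_neg (by omega), e12]
      have hkk : k - b - s = k - (b + s) := by omega
      rw [hkk]
      by_cases hpar : t % 2 = 0
      · rw [if_pos hpar]
        have p1 : fd (t-1) = fd t - 1 := by rw [fd_eq, fd_eq]; omega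
        have p2 : fd (t-2) = fd t - 1 := by rw [fd_eq, fd_eq]; omega
        apply loopAList_perm
        apply perm_count
        intro x
        rw [p1, p2]
        simp only [List.count_append, List.count_replicate, List.count_cons, List.count_nil, beq_iff_eq]
        split_ifs <;> omega
      · rw [if_neg hpar]
        have p1 : fd (t-1) = fd t := by rw [fd_eq, fd_eq]; omega
        have p2 : fd (t-2) = fd t - 1 := by rw [fd_eq, fd_eq]; omega
        apply loopAList_perm
        apply perm_count
        intro x
        rw [p1, p2]
        simp only [List.count_append, List.count_replicate, List.count_cons, List.count_nil, beq_iff_eq]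
        split_ifs <;> omega

-- once only zero-width gaps are in the heap, every further split returns (-1, 0) forever
theorem zeros : ∀ (k b s : Nat) (a0 a1 : Int), 1 ≤ b → 1 ≤ k →
    loopAList k (List.replicate b 0 ++ List.replicate s 1) a0 a1 = (-1, 0) := by
  intro k
  induction k with
  | zero => intro b s a0 a1 _ hk; omega
  | succ k ih =>
    intro b s a0 a1 hb _
    have hperm : (List.replicate b (0:Int) ++ List.replicate s 1).Perm
        ((-(0:Int)) :: (List.replicate (b-1) 0 ++ List.replicate s 1)) := by
      apply perm_count
      intro x
      simp only [List.count_append, List.count_replicate, List.count_cons, List.count_nil, neg_zero, beq_iff_eq]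
      split_ifs <;> omega
    have hmin : ∀ x ∈ List.replicate b (0:Int) ++ List.replicate s 1, -(0:Int) ≤ x := by
      intro x hx
      rcases List.mem_append.mp hx with h | h <;>
        simp [List.eq_of_mem_replicate h]
    rw [popValue k _ _ 0 a0 a1 hperm hmin]
    have e1 : fd (0 - 1) = -1 := by rw [fd_eq]; decide
    have e2 : fd 0 = 0 := by rw [fd_eq]; decide
    rw [e1, e2]
    cases k with
    | zero => rfl
    | succ k' =>
      rw [loopAList_perm _ _ (List.replicate b (0:Int) ++ List.replicate (s+1) 1) _ _ (by
        apply perm_count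
        intro x
        simp only [List.count_append, List.count_replicate, List.count_cons, List.count_nil, neg_zero, beq_iff_eq]
        split_ifs <;> omega)]
      exact ih b (s+1) _ _ hb (by omega)

-- the post-processing of Source B's final state, as a pair
def Bpost (r : Int × Int × Int × Int) : Int × Int :=
  if r.2.1 ≤ r.2.2.1 then (fd (r.1 - 1), fd r.1)
  else if r.2.1 ≤ r.2.2.1 + r.2.2.2 then (fd (r.1 - 2), fd (r.1 - 1))
  else (-1, 0)

-- the plain-list simulation of the heap equals B's grouped level loop
theorem posMain : ∀ (n : Nat) (t K big small : Int),
    t.toNat ≤ n → 1 ≤ t → 1 ≤ big → 0 ≤ small → 1 ≤ K →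
    ∀ (a0 a1 : Int),
    loopAList K.toNat (L t big.toNat small.toNat) a0 a1 = Bpost (levelLoop t K big small) := by
  intro n
  induction n with
  | zero => intro t K big small hn ht _ _ _; omega
  | succ n ih =>
    intro t K big small hn ht hb hs hK a0 a1
    have hk1 : 1 ≤ K.toNat := by omega
    rw [level t ht big.toNat small.toNat (by omega) K.toNat hk1 a0 a1]
    rw [levelLoop]
    by_cases hguard : 1 < t ∧ big + small < K
    · rw [dif_pos hguard]
      rw [if_neg (by omega), if_neg (by omega)]
      have hmod : PySem.Int.mod t 2 = t % 2 := PySem.Int.mod_eq_emod_of_pos (by omega)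
      have hfd : PySem.Int.floordiv t 2 = fd t := rfl
      have hfd2 : fd t = t / 2 := fd_eq t
      have hK' : (K - (big + small)).toNat = K.toNat - (big.toNat + small.toNat) := by omega
      rw [hmod, hfd]
      by_cases hpar : t % 2 = 0
      · rw [if_pos hpar, if_pos hpar]
        have e1 : (big + 2 * small).toNat = big.toNat + 2 * small.toNat := by omega
        have := ih (fd t) (K - (big + small)) big (big + 2 * small)
          (by omega) (by omega) hb (by omega) (by omega) a0 a1
        rw [hK', e1] at this
        exact this
      · rw [if_neg hpar, if_neg hpar]
        have e1 : (2 * big + small).toNat = 2 * big.toNat + small.toNat := by omega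
        have := ih (fd t) (K - (big + small)) (2 * big + small) small
          (by omega) (by omega) (by omega) hs (by omega) a0 a1
        rw [hK', e1] at this
        exact this
    · rw [dif_neg hguard]
      unfold Bpost
      by_cases hstop : K ≤ big + small
      · by_cases hKb : K ≤ big
        · rw [if_pos (by omega), if_pos hKb]
        · rw [if_neg (by omega), if_pos (by omega), if_neg hKb, if_pos (by omega)]
      · -- the loop stopped because t = 1 while K still exceeds the level: only zeros remain
        have ht1 : t = 1 := by omega
        subst ht1
        rw [if_neg (by omega), if_neg (by omega)]
        rw [if_neg (by decide)]
        have hfd1 : fd 1 = 0 := by rw [fd_eq]; decide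
        rw [hfd1]
        have hz : L 0 (2*big.toNat+small.toNat) small.toNat =
            List.replicate (2*big.toNat+small.toNat) (0:Int) ++ List.replicate small.toNat 1 := by
          unfold L; norm_num
        rw [hz, zeros _ _ _ a0 a1 (by omega) (by omega)]
        have hc1 : ¬ (K ≤ big) := by omega
        have hc2 : ¬ (K ≤ big + small) := by omega
        rw [if_neg hc1, if_neg hc2]

-- ===== bridge: the (value, count) queue realises the plain-list queue =====

def qsorted (Q : List (Int × Int)) : Prop := List.Pairwise (fun a b => a.1 < b.1) Q

def qpos (Q : List (Int × Int)) : Prop := ∀ p ∈ Q, 1 ≤ p.2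

def qlist (Q : List (Int × Int)) : List Int := Q.flatMap (fun p => List.replicate p.2.toNat p.1)

theorem mem_qlist (Q : List (Int × Int)) (x : Int) (hx : x ∈ qlist Q) : ∃ p ∈ Q, x = p.1 := by
  unfold qlist at hx
  rcases List.mem_flatMap.mp hx with ⟨p, hp, hx⟩
  exact ⟨p, hp, List.eq_of_mem_replicate hx⟩

theorem qput_fst (v : Int) : ∀ (Q : List (Int × Int)) (p : Int × Int), p ∈ qput v Q →
    p.1 = v ∨ ∃ q ∈ Q, p.1 = q.1 := by
  intro Q
  induction Q with
  | nil => intro p hp; simp [qput] at hp; subst hp; left; rfl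
  | cons q rest ih =>
    obtain ⟨w, c⟩ := q
    intro p hp
    unfold qput at hp
    split_ifs at hp with h1 h2
    · rcases List.mem_cons.mp hp with h | h
      · subst h; left; rfl
      · right; exact ⟨_, h, rfl⟩
    · rcases List.mem_cons.mp hp with h | h
      · subst h; left; simp [h2]
      · right; exact ⟨_, List.mem_cons_of_mem _ h, rfl⟩
    · rcases List.mem_cons.mp hp with h | h
      · subst h; right; exact ⟨(w, c), List.mem_cons_self, rfl⟩
      · rcases ih p h with h' | ⟨q', hq', h'⟩
        · left; exact h'
        · right; exact ⟨q', List.mem_cons_of_mem _ hq', h'⟩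

theorem qput_sorted (v : Int) : ∀ (Q : List (Int × Int)), qsorted Q → qsorted (qput v Q) := by
  intro Q
  induction Q with
  | nil => intro _; unfold qput qsorted; simp
  | cons q rest ih =>
    obtain ⟨w, c⟩ := q
    intro hs
    have hs' : qsorted rest := (List.pairwise_cons.mp hs).2
    have hw : ∀ p ∈ rest, w < p.1 := fun p hp => (List.pairwise_cons.mp hs).1 p hp
    unfold qput qsorted
    split_ifs with h1 h2
    · exact List.pairwise_cons.mpr ⟨by
        intro p hp
        rcases List.mem_cons.mp hp with h | h
        · subst h; exact h1
        · exact lt_trans h1 (hw p h), hs⟩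
    · exact List.pairwise_cons.mpr ⟨by
        intro p hp; exact h2 ▸ hw p hp, hs'⟩
    · refine List.pairwise_cons.mpr ⟨?_, ih hs'⟩
      intro p hp
      rcases qput_fst v rest p hp with h | ⟨q', hq', h⟩
      · omega
      · rw [h]; exact hw q' hq'

theorem qput_pos (v : Int) : ∀ (Q : List (Int × Int)), qpos Q → qpos (qput v Q) := by
  intro Q
  induction Q with
  | nil => intro _ p hp; simp [qput] at hp; subst hp; simp
  | cons q rest ih =>
    obtain ⟨w, c⟩ := q
    intro hp0 p hp
    have hrest : qpos rest := fun p hp => hp0 p (List.mem_cons_of_mem _ hp)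
    have hc : 1 ≤ c := hp0 (w, c) List.mem_cons_self
    unfold qput at hp
    split_ifs at hp with h1 h2
    · rcases List.mem_cons.mp hp with h | h
      · subst h; simp
      · exact hp0 p h
    · rcases List.mem_cons.mp hp with h | h
      · subst h; simp; omega
      · exact hrest p h
    · rcases List.mem_cons.mp hp with h | h
      · subst h; exact hc
      · exact ih hrest p h

theorem qput_ne_nil (v : Int) (Q : List (Int × Int)) : qput v Q ≠ [] := by
  cases Q with
  | nil => simp [qput]
  | cons q rest =>
    obtain ⟨w, c⟩ := q
    unfold qput
    split_ifs <;> simp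

theorem qpop_sorted (Q : List (Int × Int)) (hs : qsorted Q) : qsorted (qpop Q) := by
  cases Q with
  | nil => exact hs
  | cons q rest =>
    obtain ⟨w, c⟩ := q
    have hs' := List.pairwise_cons.mp hs
    simp only [qpop]
    split_ifs
    · exact hs'.2
    · exact List.pairwise_cons.mpr ⟨hs'.1, hs'.2⟩

theorem qpop_pos (Q : List (Int × Int)) (hp : qpos Q) : qpos (qpop Q) := by
  cases Q with
  | nil => exact hp
  | cons q rest =>
    obtain ⟨w, c⟩ := q
    have hc : 1 ≤ c := hp (w, c) List.mem_cons_self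
    intro p hpp
    simp only [qpop] at hpp
    split_ifs at hpp with h1
    · exact hp p (List.mem_cons_of_mem _ hpp)
    · rcases List.mem_cons.mp hpp with h | h
      · subst h; simp; omega
      · exact hp p (List.mem_cons_of_mem _ h)

theorem qlist_cons (Q : List (Int × Int)) (hp : qpos Q) (hne : Q ≠ []) :
    qlist Q = qtop Q :: qlist (qpop Q) := by
  cases Q with
  | nil => exact absurd rfl hne
  | cons q rest =>
    obtain ⟨w, c⟩ := q
    have hc : 1 ≤ c := hp (w, c) List.mem_cons_self
    simp only [qlist, qtop, qpop]
    split_ifs with h1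
    · subst h1; simp
    · simp only [List.flatMap_cons]
      have e1 : c.toNat = (c - 1).toNat + 1 := by omega
      rw [e1, List.replicate_succ]
      simp

theorem qtop_min (Q : List (Int × Int)) (hs : qsorted Q) (x : Int) (hx : x ∈ qlist Q) :
    qtop Q ≤ x := by
  cases Q with
  | nil => simp [qlist] at hx
  | cons q rest =>
    obtain ⟨w, c⟩ := q
    rcases mem_qlist _ x hx with ⟨p, hp, hxp⟩
    rcases List.mem_cons.mp hp with h | h
    · subst h; subst hxp; exact le_refl _
    · subst hxp
      exact le_of_lt ((List.pairwise_cons.mp hs).1 p h)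

theorem qput_qlist_perm (v : Int) : ∀ (Q : List (Int × Int)), qpos Q →
    (qlist (qput v Q)).Perm (v :: qlist Q) := by
  intro Q
  induction Q with
  | nil => simp [qput, qlist]
  | cons q rest ih =>
    obtain ⟨w, c⟩ := q
    intro hp0
    have hrest : qpos rest := fun p hp => hp0 p (List.mem_cons_of_mem _ hp)
    have hc : 1 ≤ c := hp0 (w, c) List.mem_cons_self
    unfold qput
    split_ifs with h1 h2
    · unfold qlist
      simp
    · subst h2
      unfold qlist
      simp only [List.flatMap_cons]
      have e1 : (c + 1).toNat = c.toNat + 1 := by omega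
      rw [e1, List.replicate_succ]
      simp
    · unfold qlist
      simp only [List.flatMap_cons]
      exact (List.Perm.append_left (List.replicate c.toNat w) (ih hrest)).trans List.perm_middle

theorem loopA_bridge : ∀ (k : Nat) (Q : List (Int × Int)) (a0 a1 : Int),
    qsorted Q → qpos Q → Q ≠ [] →
    loopA k Q a0 a1 = loopAList k (qlist Q) a0 a1 := by
  intro k
  induction k with
  | zero => intro Q a0 a1 _ _ _; rfl
  | succ k ih =>
    intro Q a0 a1 hs hp hne
    have hE : qlist Q = (-(-(qtop Q))) :: qlist (qpop Q) := by
      rw [neg_neg]; exact qlist_cons Q hp hne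
    have hmin : ∀ x ∈ qlist Q, -(-(qtop Q)) ≤ x := by
      intro x hx; rw [neg_neg]; exact qtop_min Q hs x hx
    rw [popValue k (qlist Q) (qlist (qpop Q)) (-(qtop Q)) a0 a1 (hE ▸ List.Perm.refl _) hmin]
    show loopA (k+1) Q a0 a1 = _
    simp only [loopA]
    have e1 : PySem.Int.floordiv (-(qtop Q) - 1) 2 = fd (-(qtop Q) - 1) := rfl
    have e2 : -(qtop Q) - fd (-(qtop Q) - 1) - 1 = fd (-(qtop Q)) := by rw [fd_eq, fd_eq]; omega
    rw [e1, e2]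
    rw [ih (qput (-(fd (-(qtop Q)))) (qput (-(fd (-(qtop Q) - 1))) (qpop Q))) _ _
        (qput_sorted _ _ (qput_sorted _ _ (qpop_sorted Q hs)))
        (qput_pos _ _ (qput_pos _ _ (qpop_pos Q hp)))
        (qput_ne_nil _ _)]
    apply loopAList_perm
    refine (qput_qlist_perm _ _ (qput_pos _ _ (qpop_pos Q hp))).trans ?_
    refine (List.Perm.cons _ (qput_qlist_perm _ _ (qpop_pos Q hp))).trans ?_
    apply perm_count
    intro x
    simp only [List.count_append, List.count_cons, List.count_nil, beq_iff_eq]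
    split_ifs <;> omega

theorem bathroomStalls_spec' (N K : Int) (hpre : K ≤ 0 ∨ 0 ≤ N) :
    bathroomStalls N K = bathroomStalls_alt N K := by
  unfold bathroomStalls bathroomStalls_alt
  by_cases hK0 : K ≤ 0
  · rw [if_pos hK0]
    have h0 : K.toNat = 0 := by omega
    rw [h0]
    rfl
  rw [if_neg hK0]
  have hK : 1 ≤ K := by omega
  have hN : 0 ≤ N := by rcases hpre with h | h; omega; exact h
  have hq : qput (-N) [] = [((-N : Int), (1 : Int))] := rfl
  have hinit : loopA K.toNat (qput (-N) []) 0 0 = loopAList K.toNat [-N] 0 0 := by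
    rw [loopA_bridge K.toNat (qput (-N) []) 0 0
      (by simp [hq, qsorted])
      (by rw [hq]; intro p hp; simp only [List.mem_singleton] at hp; rw [hp])
      (qput_ne_nil _ _)]
    rw [hq]
    rfl
  rw [hinit]
  by_cases hN1 : 1 ≤ N
  · have hL : [-N] = L N (1:Int).toNat (0:Int).toNat := by unfold L; simp
    rw [hL]
    rw [posMain N.toNat N K 1 0 (le_refl _) hN1 (by omega) (by omega) hK]
    unfold Bpost
    by_cases h1 : (levelLoop N K 1 0).2.1 ≤ (levelLoop N K 1 0).2.2.1
    · rw [if_pos h1]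
      simp only [if_pos h1]
      rfl
    · rw [if_neg h1]
      simp only [if_neg h1]
      by_cases h2 : (levelLoop N K 1 0).2.1 ≤ (levelLoop N K 1 0).2.2.1 + (levelLoop N K 1 0).2.2.2
      · rw [if_pos h2]
        simp only [if_pos h2]
        have e : (levelLoop N K 1 0).1 - 1 - 1 = (levelLoop N K 1 0).1 - 2 := by ring
        rw [e]
        rfl
      · rw [if_neg h2]
        simp only [if_neg h2]
        decide
  · -- N = 0: the heap holds a single zero-width gap from the start
    have hN0 : N = 0 := by omega
    subst hN0
    have hz : [-(0:Int)] = List.replicate 1 (0:Int) ++ List.replicate 0 1 := by norm_num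
    rw [hz, zeros K.toNat 1 0 0 0 (by omega) (by omega)]
    rw [levelLoop, dif_neg (by omega)]
    by_cases h1 : K ≤ 1
    · simp only [show (1:Int) + 0 = 1 from rfl, if_pos h1]
      decide
    · simp only [show (1:Int) + 0 = 1 from rfl, if_neg h1]
      decide

-- ===== VERDICT (by name: the statement is the Claim_ definition above) =====
theorem bathroomStalls_spec : Claim_equal_bathroomStalls := by
  intro N K _ hpre
  unfold Spec_bathroomStalls
  exact bathroomStalls_spec' N K hpre
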